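/-
  jsmn ON THE MODEL, MACHINE LEVEL, ANY CALLER (the form of Prog/Deflate/Theorem.lean `zgzip_correct_v3_of`): the contracts of Prog/Jsmn/Specs.lean, which
  speak about user states and `Reach`, restated about

      X86.run (Dec.decoder μ (Dec.mkTable X86.allRows)) m k      the model's decoder, any processor μ with MicroOK μ,
      User.Abs n m v0                                             the machine `m` is in the user relation with the user state `v0` (layout `n`:
                                                                  `n.pages` 2 MB pages identity-mapped, privilege level `n.cpl` ∈ {0, 3})

  for either binary `b` (binD = default configuration, binS = -DJSMN_STRICT -DJSMN_PARENT_LINKS):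
    jsmn_parse_correct_v3_of   from the entry of jsmn_parse(parser, js, len, tokens, num_tokens) with a parser STATE satisfying the model-side precondition `Inv`
                               (the function is re-entrant) the run RETURNS with eax = r, the parser struct = p', the token array = toks', where
                               (r, p', toks') is what the pure model `Jsmn.parseFuel` answers; everything outside jsmn_parse's stack window, the parser
                               struct and the token array is kept (`CallPost`). Counting mode (tokens == NULL) included.
    jsmn_main_correct_v3_of    from the entry of jsmn_main(js, len, out, num_tokens): returns with rax = |o| and o = `encodeResult b.cfg r ts'` at `out`.
  Each FROM its contract on the flat user machine (`ParseSpec b n` / `MainSpec b n`), which Prog/Jsmn/D, S prove, by `Reach.sound`; nothing else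
  is assumed. The conclusion adds that the system part of the machine is untouched (`m'.sysPart = m.sysPart`).
-/
import Prog.Jsmn.Specs

namespace X86
namespace J6
open X86.User (CodeAt RegsKept Span FlagsOK Layout toNat_add_ofNat toNat_ofNat_lt' add_ofNat_add)
open Jsmn

set_option linter.unusedVariables false

/-- **jsmn_parse computes the model, on the machine** (from the contract `ParseSpec b n`). -/
theorem jsmn_parse_correct_v3_of {b : Bin} {n : User.Layout} (hspec : ParseSpec b n) (μ : Microarch) (hμ : MicroOK μ) (m : Machine)
    (v0 : User.State) (ha : User.Abs n m v0) (ret pa jsA tb : Word) (js : List UInt8) (numTokens : Nat) (p : Parser) (toks : Option Tokens)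
    (fuel : Nat) (r : Int) (p' : Parser) (toks' : Option Tokens)
    (hp : ScanPre b n b.parse b.useParse v0 ret pa jsA tb js numTokens p toks)
    (hr8 : Word.low .w32 (v0.reg .r8) = UInt64.ofNat numTokens) (hinv : Inv b.cfg p toks numTokens)
    (hmodel : parseFuel b.cfg fuel js p toks numTokens = some (r, p', toks')) :
    ∃ k m' v', _root_.X86.run (Dec.decoder μ (Dec.mkTable X86.allRows)) m k = .next m' ∧ User.Abs n m' v' ∧
      ScanPost b b.useParse v0 ret pa tb numTokens toks r p' toks' v' ∧ m'.sysPart = m.sysPart := by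
  obtain ⟨k, m', v', h1, h2, h3, h4⟩ :=
    (hspec v0 ret pa jsA tb js numTokens p toks fuel r p' toks' hp hr8 hinv hmodel).sound μ hμ m ha
  exact ⟨k, m', v', h1, h2, h3, h4⟩

/-- **jsmn_main leaves the model's answer, encoded, in the output buffer, on the machine** (from the contract `MainSpec b n`). -/
theorem jsmn_main_correct_v3_of {b : Bin} {n : User.Layout} (hspec : MainSpec b n) (μ : Microarch) (hμ : MicroOK μ) (m : Machine)
    (v0 : User.State) (ha : User.Abs n m v0) (ret jsA out : Word) (js : List UInt8) (numTokens : Nat) (ts : Tokens) (fuel : Nat)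
    (r : Int) (p' : Parser) (ts' : Tokens)
    (hp : MainPre b n v0 ret jsA out js numTokens ts)
    (hmodel : parseFuel b.cfg fuel js Parser.init (some ts) numTokens = some (r, p', some ts')) (hr : 0 ≤ r → r ≤ numTokens) :
    ∃ k m' v', _root_.X86.run (Dec.decoder μ (Dec.mkTable X86.allRows)) m k = .next m' ∧ User.Abs n m' v' ∧
      (CallPost v0 b.useMain [(out.toNat, out.toNat + (4 + b.cfg.tokSize * numTokens))] ret v' ∧
        v'.reg .rax = UInt64.ofNat (encodeResult b.cfg r ts').length ∧ CodeAt v'.mem out (encodeResult b.cfg r ts')) ∧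
      m'.sysPart = m.sysPart := by
  obtain ⟨k, m', v', h1, h2, h3, h4⟩ :=
    (hspec v0 ret jsA out js numTokens ts fuel r p' ts' hp hmodel hr).sound μ hμ m ha
  exact ⟨k, m', v', h1, h2, h3, h4⟩

end J6
end X86

#print axioms X86.J6.jsmn_parse_correct_v3_of
#print axioms X86.J6.jsmn_main_correct_v3_of
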